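-- pv_equiv track=rewrite | github.com/w224lin/Little-Go-Competitive-Engine | my_player3.py | array_to_bitboard
-- ===== SOURCE A (Python) =====
-- BOARD_SIZE = 5
--
-- def array_to_bitboard(array):
--     """将二维列表或元组转换为位板表示。"""
--     bitboard = 0
--     for i in range(BOARD_SIZE):
--         for j in range(BOARD_SIZE):
--             value = array[i][j]
--             index = i * BOARD_SIZE + j
--             bitboard |= (value << (2 * index))
--     return bitboard
-- ===== SOURCE B (Python) =====
-- BOARD_SIZE = 5
--
-- def array_to_bitboard(array):
--     """Recursive two-level decomposition: build each row's 10-bit value by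
--     Horner recursion over its 5 cells, then combine the row values by a
--     Horner recursion shifting 10 bits per row (OR keeps overlap exact)."""
--     def row_bits(row, j):
--         if j == BOARD_SIZE:
--             return 0
--         return (row_bits(row, j + 1) << 2) | row[j]
--
--     def combine(i):
--         if i == BOARD_SIZE:
--             return 0
--         return (combine(i + 1) << 10) | row_bits(array[i], 0)
--
--     return combine(0)
-- ===== Notes on version B (the rewrite author's own statement) =====
-- stated objective: alternative
-- what changed: Replaces A's nested index loops with absolute per-cell shifts (bitboard |= value << 2*(i*5+j)) by a recursive two-level decomposition: each row's 10-bit value is built by Horner recursion over its cells ((acc<<2)|v) and the five row values are combined by a second Horner recursion shifting 10 bits per row, using OR so overlapping out-of-range values match exactly.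
import Mathlib
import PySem

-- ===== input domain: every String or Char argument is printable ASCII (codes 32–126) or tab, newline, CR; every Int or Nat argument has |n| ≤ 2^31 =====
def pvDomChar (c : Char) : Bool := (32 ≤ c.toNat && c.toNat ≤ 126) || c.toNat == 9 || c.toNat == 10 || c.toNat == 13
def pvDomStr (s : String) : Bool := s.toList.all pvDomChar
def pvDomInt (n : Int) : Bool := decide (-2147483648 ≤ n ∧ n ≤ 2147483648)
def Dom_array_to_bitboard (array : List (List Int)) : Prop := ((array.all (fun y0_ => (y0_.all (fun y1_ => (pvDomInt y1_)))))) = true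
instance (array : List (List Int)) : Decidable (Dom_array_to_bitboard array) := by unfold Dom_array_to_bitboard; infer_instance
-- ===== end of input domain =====

-- B replaces A's per-cell absolute index/shift bookkeeping by a recursive two-level decomposition
-- (Horner over each row's cells, then Horner over the row values shifting 10 bits per row):
-- an alternative decomposition of the same bitboard construction, not claimed faster.


-- ===== PORT A =====
-- literal port of A: nested loops over range(5), bitboard |= value << (2*index); shift counts are
-- nonnegative, written via .toNat (exact here since index = i*5+j ≥ 0 for i,j from range(5)).
def array_to_bitboard (array : List (List Int)) : Int :=
  (PySem.List.pyRange 0 5 1).foldl (fun bitboard i =>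
    (PySem.List.pyRange 0 5 1).foldl (fun bitboard j =>
      let value := PySem.List.pyGetD (PySem.List.pyGetD array i []) j 0
      let index := i * 5 + j
      PySem.Int.bor bitboard (value <<< (2 * index).toNat)) bitboard) 0

-- ===== PORT B =====
-- literal port of B's row_bits: Horner recursion over the cells of one row, base case j == 5.
-- The fuel argument only makes the recursion total in Lean; with fuel 6 it never runs out
-- on the indices 0..5 actually reached, so it is exact.
def pvRowBits (row : List Int) (fuel : Nat) (j : Nat) : Int :=
  match fuel with
  | 0 => 0
  | f + 1 =>
    if j = 5 then 0
    else PySem.Int.bor (pvRowBits row f (j + 1) <<< (2 : Nat)) (PySem.List.pyGetD row (j : Int) 0)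

-- literal port of B's combine: Horner recursion over the rows, 10 bits per row, base case i == 5.
def pvCombine (array : List (List Int)) (fuel : Nat) (i : Nat) : Int :=
  match fuel with
  | 0 => 0
  | f + 1 =>
    if i = 5 then 0
    else PySem.Int.bor (pvCombine array f (i + 1) <<< (10 : Nat))
      (pvRowBits (PySem.List.pyGetD array (i : Int) []) 6 0)

def array_to_bitboard_alt (array : List (List Int)) : Int :=
  pvCombine array 6 0

-- ===== PRECONDITION & SPEC =====
-- Pre_ excludes exactly the inputs where Python A raises IndexError: boards with fewer than
-- 5 rows, or a row of fewer than 5 cells among the first five.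
def Pre_array_to_bitboard (array : List (List Int)) : Prop :=
  5 ≤ array.length ∧ ∀ row ∈ array.take 5, 5 ≤ row.length
instance (array : List (List Int)) : Decidable (Pre_array_to_bitboard array) := by
  unfold Pre_array_to_bitboard; infer_instance
def pvWitness_array_to_bitboard : List (List Int) :=
  [[0,0,0,0,0],[0,0,0,0,0],[0,0,1,2,0],[0,0,0,0,0],[0,0,0,0,0]]

def Spec_array_to_bitboard (array : List (List Int)) (out : Int) : Prop := out = array_to_bitboard_alt array
instance (array : List (List Int)) (out : Int) : Decidable (Spec_array_to_bitboard array out) := by unfold Spec_array_to_bitboard; infer_instance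

-- ===== CLAIM (what is proved, stated in full; the proofs are below) =====
def Claim_equal_array_to_bitboard : Prop := ∀ (array : List (List Int)), Dom_array_to_bitboard array → Pre_array_to_bitboard array → Spec_array_to_bitboard array (array_to_bitboard array)

-- ===== LEMMAS AND PROOFS =====

theorem nat_ldiff_add_and (n m : Nat) : Nat.ldiff n m + (n &&& m) = n := by
  induction n using Nat.binaryRec generalizing m with
  | zero => simp [Nat.ldiff]
  | bit a n ih =>
    induction m using Nat.bitCasesOn with
    | bit b m =>
      rw [Nat.ldiff_bit, Nat.land_bit]
      simp only [Nat.bit_val]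
      have h := ih m
      cases a <;> cases b <;> simp only [Bool.and_true, Bool.and_false, Bool.not_true,
        Bool.not_false, Bool.toNat_true, Bool.toNat_false] <;> omega

theorem nat_sub_and (n m : Nat) : n - (n &&& m) = Nat.ldiff n m := by
  have h := nat_ldiff_add_and n m
  omega

theorem bor_eq_lor (a b : Int) : PySem.Int.bor a b = Int.lor a b := by
  cases a with
  | ofNat m => cases b with
    | ofNat n => simp [PySem.Int.bor, Int.lor]
    | negSucc n =>
      simp only [PySem.Int.bor, Int.lor]
      norm_num [Int.negSucc_eq]
      rw [nat_sub_and]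
      omega
  | negSucc m => cases b with
    | ofNat n =>
      simp only [PySem.Int.bor, Int.lor]
      norm_num [Int.negSucc_eq]
      rw [nat_sub_and]
      omega
    | negSucc n =>
      simp only [PySem.Int.bor, Int.lor]
      norm_num [Int.negSucc_eq]
      rw [if_neg (by omega), if_neg (by omega)]
      omega

theorem int_eq_of_testBit_eq {a b : Int} (h : ∀ k, a.testBit k = b.testBit k) : a = b := by
  cases a with
  | ofNat m => cases b with
    | ofNat n =>
      congr 1
      apply Nat.eq_of_testBit_eq
      intro k; simpa [Int.testBit] using h k
    | negSucc n =>
      exfalso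
      have hk := h (m + n)
      have h1 : Nat.testBit m (m + n) = false := Nat.testBit_eq_false_of_lt (by
        calc m < 2 ^ m := Nat.lt_two_pow_self
        _ ≤ 2 ^ (m + n) := Nat.pow_le_pow_right (by norm_num) (by omega))
      have h2 : Nat.testBit n (m + n) = false := Nat.testBit_eq_false_of_lt (by
        calc n < 2 ^ n := Nat.lt_two_pow_self
        _ ≤ 2 ^ (m + n) := Nat.pow_le_pow_right (by norm_num) (by omega))
      simp [Int.testBit, h1, h2] at hk
  | negSucc m => cases b with
    | ofNat n =>
      exfalso
      have hk := h (m + n)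
      have h1 : Nat.testBit m (m + n) = false := Nat.testBit_eq_false_of_lt (by
        calc m < 2 ^ m := Nat.lt_two_pow_self
        _ ≤ 2 ^ (m + n) := Nat.pow_le_pow_right (by norm_num) (by omega))
      have h2 : Nat.testBit n (m + n) = false := Nat.testBit_eq_false_of_lt (by
        calc n < 2 ^ n := Nat.lt_two_pow_self
        _ ≤ 2 ^ (m + n) := Nat.pow_le_pow_right (by norm_num) (by omega))
      simp [Int.testBit, h1, h2] at hk
    | negSucc n =>
      congr 1
      apply Nat.eq_of_testBit_eq
      intro k
      have hk := h k
      simpa [Int.testBit] using hk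

theorem tb_shiftLeft' (x k i : Nat) :
    Nat.testBit (Nat.shiftLeft' true x k) i = (decide (i < k) || Nat.testBit x (i - k)) := by
  induction k generalizing i with
  | zero => simp [Nat.shiftLeft']
  | succ k ih =>
    rw [Nat.shiftLeft']
    cases i with
    | zero => simp [Nat.testBit_bit_zero]
    | succ i =>
      rw [show Nat.bit true (Nat.shiftLeft' true x k) = 2 * Nat.shiftLeft' true x k + 1 from rfl,
        Nat.testBit_add_one, show (2 * Nat.shiftLeft' true x k + 1) / 2 = Nat.shiftLeft' true x k by omega,
        ih]
      simp [Nat.succ_lt_succ_iff, Nat.succ_sub_succ]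

theorem int_testBit_shiftLeft (a : Int) (k i : Nat) :
    Int.testBit (a <<< k) i = (decide (k ≤ i) && Int.testBit a (i - k)) := by
  rw [← Int.shiftLeft_natCast_right]
  cases a with
  | ofNat m =>
    rw [Int.ofNat_eq_natCast, Int.shiftLeft_natCast]
    simp [Int.testBit, Nat.testBit_shiftLeft]
  | negSucc m =>
    rw [Int.shiftLeft_negSucc]
    simp only [Int.testBit, tb_shiftLeft']
    by_cases h : k ≤ i
    · simp [h, show ¬ (i < k) by omega]
    · simp [h, show i < k by omega]

theorem zero_shl (k : Nat) : (0 : Int) <<< k = 0 := by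
  rw [← Int.shiftLeft_natCast_right]; exact Int.zero_shiftLeft' _
theorem zero_bor (a : Int) : PySem.Int.bor 0 a = a := by
  rw [PySem.Int.bor_comm]; exact PySem.Int.bor_zero a
theorem bor_assoc' (a b c : Int) :
    PySem.Int.bor (PySem.Int.bor a b) c = PySem.Int.bor a (PySem.Int.bor b c) := by
  simp only [bor_eq_lor]
  apply int_eq_of_testBit_eq
  intro k
  simp [Int.testBit_lor, Bool.or_assoc]
theorem bor_shiftLeft (a b : Int) (k : Nat) :
    (PySem.Int.bor a b) <<< k = PySem.Int.bor (a <<< k) (b <<< k) := by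
  simp only [bor_eq_lor]
  apply int_eq_of_testBit_eq
  intro i
  simp [Int.testBit_lor, int_testBit_shiftLeft, Bool.and_or_distrib_left]
theorem int_shiftLeft_shiftLeft (a : Int) (m n : Nat) : (a <<< m) <<< n = a <<< (m + n) := by
  rw [← Int.shiftLeft_natCast_right, ← Int.shiftLeft_natCast_right,
    ← Int.shiftLeft_natCast_right, Int.shiftLeft_eq_mul_pow, Int.shiftLeft_eq_mul_pow,
    Int.shiftLeft_eq_mul_pow]
  push_cast
  ring
theorem int_shiftLeft_zero (a : Int) : a <<< (0 : Nat) = a := by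
  have := Int.shiftLeft_eq_mul_pow a 0
  rw [← Int.shiftLeft_natCast_right]
  simpa using this
theorem bor_left_comm (a b c : Int) :
    PySem.Int.bor a (PySem.Int.bor b c) = PySem.Int.bor b (PySem.Int.bor a c) := by
  rw [← bor_assoc', PySem.Int.bor_comm a b, bor_assoc']

theorem pg1 {α : Type} (a b : α) (t : List α) (df : α) :
    PySem.List.pyGetD (a::b::t) (1:Int) df = b := by
  have h : ((1:Int) ≤ (t.length:Int) + 1) := by omega
  simp [PySem.List.pyGetD, PySem.List.pyGet?, PySem.List.pyIdx?, h]
theorem pg2 {α : Type} (a b c : α) (t : List α) (df : α) :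
    PySem.List.pyGetD (a::b::c::t) (2:Int) df = c := by
  have h : ((2:Int) ≤ (t.length:Int) + 1 + 1) := by omega
  simp [PySem.List.pyGetD, PySem.List.pyGet?, PySem.List.pyIdx?, h]
theorem pg3 {α : Type} (a b c d : α) (t : List α) (df : α) :
    PySem.List.pyGetD (a::b::c::d::t) (3:Int) df = d := by
  have h : ((3:Int) ≤ (t.length:Int) + 1 + 1 + 1) := by omega
  simp [PySem.List.pyGetD, PySem.List.pyGet?, PySem.List.pyIdx?, h]
theorem pg4 {α : Type} (a b c d e : α) (t : List α) (df : α) :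
    PySem.List.pyGetD (a::b::c::d::e::t) (4:Int) df = e := by
  have h : ((4:Int) ≤ (t.length:Int) + 1 + 1 + 1 + 1) := by omega
  simp [PySem.List.pyGetD, PySem.List.pyGet?, PySem.List.pyIdx?, h]
theorem pg0 {α : Type} (a : α) (t : List α) (df : α) :
    PySem.List.pyGetD (a::t) (0:Int) df = a := PySem.List.pyGetD_zero_cons a t df

theorem exists5 {α : Type} (l : List α) (h : 5 ≤ l.length) :
    ∃ a b c d e t, l = a::b::c::d::e::t := by
  rcases l with _ | ⟨a, _ | ⟨b, _ | ⟨c, _ | ⟨d, _ | ⟨e, t⟩⟩⟩⟩⟩ <;>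
    simp at h <;> try omega
  exact ⟨a, b, c, d, e, t, rfl⟩

theorem pr5 : PySem.List.pyRange 0 5 1 = [0,1,2,3,4] := rfl

theorem ab_main (array : List (List Int))
    (hlen : 5 ≤ array.length) (hrows : ∀ row ∈ array.take 5, 5 ≤ row.length) :
    array_to_bitboard array = array_to_bitboard_alt array := by
  obtain ⟨r0, r1, r2, r3, r4, rest, rfl⟩ := exists5 array hlen
  obtain ⟨a0, a1, a2, a3, a4, t0, rfl⟩ := exists5 r0 (hrows _ (by simp))
  obtain ⟨b0, b1, b2, b3, b4, t1, rfl⟩ := exists5 r1 (hrows _ (by simp))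
  obtain ⟨c0, c1, c2, c3, c4, t2, rfl⟩ := exists5 r2 (hrows _ (by simp))
  obtain ⟨d0, d1, d2, d3, d4, t3, rfl⟩ := exists5 r3 (hrows _ (by simp))
  obtain ⟨e0, e1, e2, e3, e4, t4, rfl⟩ := exists5 r4 (hrows _ (by simp))
  simp only [array_to_bitboard, array_to_bitboard_alt, pr5, List.foldl,
    pvCombine, pvRowBits, pg0, pg1, pg2, pg3, pg4]
  norm_num [pg0, pg1, pg2, pg3, pg4]
  simp only [bor_shiftLeft, int_shiftLeft_shiftLeft]
  norm_num [int_shiftLeft_zero, zero_shl, zero_bor]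
  simp only [bor_assoc']
  simp [bor_assoc', PySem.Int.bor_comm, bor_left_comm]

-- ===== VERDICT (by name: the statement is the Claim_ definition above) =====
theorem array_to_bitboard_spec : Claim_equal_array_to_bitboard := by
  intro array _ hpre
  unfold Spec_array_to_bitboard
  exact ab_main array hpre.1 hpre.2
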